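-- pv_equiv track=rewrite | github.com/cosmic-glitch/book-summarizer-2 | generate_audio.py | build_script
-- ===== SOURCE A (Python) =====
-- def build_script(segments: list[tuple[str, str]]) -> str:
--     """Convert segments into a natural speech script."""
--     title    = next((t for k, t in segments if k == "title"),    "")
--     subtitle = next((t for k, t in segments if k == "subtitle"), "")
--     author   = next((t for k, t in segments if k == "author"),   "")
--
--     lines = []
--
--     # Opening
--     if subtitle:
--         lines.append(f"Summary of {title}: {subtitle}, by {author}.")
--     else:
--         lines.append(f"Summary of {title}, by {author}.")
--
--     for kind, text in segments:
--         if kind in ("title", "subtitle", "author"):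
--             continue
--         elif kind == "chapter":
--             lines.append(f"\n\n{text}.\n")
--         elif kind == "para":
--             lines.append(text)
--         elif kind == "counterpoint":
--             pass  # excluded from audio
--
--     return "\n".join(lines)
-- ===== SOURCE B (Python) =====
-- def build_script(segments: list[tuple[str, str]]) -> str:
--     """Convert segments into a natural speech script."""
--     # One fused pass: collect first-seen metadata and the body lines together.
--     title = subtitle = author = None
--     parts = []
--     for kind, text in segments:
--         if kind == "title":
--             if title is None:
--                 title = text
--         elif kind == "subtitle":
--             if subtitle is None:
--                 subtitle = text
--         elif kind == "author":
--             if author is None: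
--                 author = text
--         elif kind == "chapter":
--             parts.append("\n\n" + text + ".\n")
--         elif kind == "para":
--             parts.append(text)
--     title = title if title is not None else ""
--     subtitle = subtitle if subtitle is not None else ""
--     author = author if author is not None else ""
--     if subtitle:
--         head = f"Summary of {title}: {subtitle}, by {author}."
--     else:
--         head = f"Summary of {title}, by {author}."
--     return "\n".join([head] + parts)
-- ===== Notes on version B (the rewrite author's own statement) =====
-- stated objective: simpler
-- what changed: A makes four traversals (three next() scans for the metadata plus the body loop); B is a single fused pass whose accumulator holds the three first-seen metadata options and the body list at once, with the opening line assembled afterwards.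
import Mathlib
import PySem

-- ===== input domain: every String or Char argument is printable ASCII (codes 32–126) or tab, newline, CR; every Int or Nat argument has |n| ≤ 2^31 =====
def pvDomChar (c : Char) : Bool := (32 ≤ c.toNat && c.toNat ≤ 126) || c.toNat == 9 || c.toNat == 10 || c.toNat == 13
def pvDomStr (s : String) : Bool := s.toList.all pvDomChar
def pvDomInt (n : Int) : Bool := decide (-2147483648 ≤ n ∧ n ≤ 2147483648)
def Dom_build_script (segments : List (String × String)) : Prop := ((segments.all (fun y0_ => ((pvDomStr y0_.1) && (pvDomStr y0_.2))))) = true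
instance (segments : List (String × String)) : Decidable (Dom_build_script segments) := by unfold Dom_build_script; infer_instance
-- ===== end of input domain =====

-- B replaces A's four traversals (three next() scans plus the body loop) by one
-- fused pass whose accumulator carries the first-seen metadata and the body list
-- (objective: simpler, single-pass).

-- ===== PORT A =====
def build_script (segments : List (String × String)) : String :=
  let title    := ((segments.find? (fun p => p.1 == "title")).map (·.2)).getD ""
  let subtitle := ((segments.find? (fun p => p.1 == "subtitle")).map (·.2)).getD ""
  let author   := ((segments.find? (fun p => p.1 == "author")).map (·.2)).getD ""
  let lines : List String :=
    if subtitle ≠ "" then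
      ["Summary of " ++ title ++ ": " ++ subtitle ++ ", by " ++ author ++ "."]
    else
      ["Summary of " ++ title ++ ", by " ++ author ++ "."]
  let lines := segments.foldl (fun ls p =>
      if p.1 == "title" || p.1 == "subtitle" || p.1 == "author" then ls
      else if p.1 == "chapter" then ls ++ ["\n\n" ++ p.2 ++ ".\n"]
      else if p.1 == "para" then ls ++ [p.2]
      else ls) lines
  PySem.Str.join "\n" lines

-- ===== PORT B =====
-- the fused loop body of Source B's single pass
def bsStep (st : (Option String × Option String × Option String) × List String)
    (p : String × String) : (Option String × Option String × Option String) × List String :=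
  if p.1 == "title" then
    ((if st.1.1.isNone then some p.2 else st.1.1, st.1.2.1, st.1.2.2), st.2)
  else if p.1 == "subtitle" then
    ((st.1.1, if st.1.2.1.isNone then some p.2 else st.1.2.1, st.1.2.2), st.2)
  else if p.1 == "author" then
    ((st.1.1, st.1.2.1, if st.1.2.2.isNone then some p.2 else st.1.2.2), st.2)
  else if p.1 == "chapter" then
    (st.1, st.2 ++ ["\n\n" ++ p.2 ++ ".\n"])
  else if p.1 == "para" then
    (st.1, st.2 ++ [p.2])
  else st

def build_script_alt (segments : List (String × String)) : String :=
  let st := segments.foldl bsStep ((none, none, none), [])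
  let title    := st.1.1.getD ""
  let subtitle := st.1.2.1.getD ""
  let author   := st.1.2.2.getD ""
  let head :=
    if subtitle ≠ "" then
      "Summary of " ++ title ++ ": " ++ subtitle ++ ", by " ++ author ++ "."
    else
      "Summary of " ++ title ++ ", by " ++ author ++ "."
  PySem.Str.join "\n" ([head] ++ st.2)

-- ===== PRECONDITION & SPEC =====
def Spec_build_script (segments : List (String × String)) (out : String) : Prop := out = build_script_alt segments
instance (segments : List (String × String)) (out : String) : Decidable (Spec_build_script segments out) := by unfold Spec_build_script; infer_instance

-- ===== CLAIM (what is proved, stated in full; the proofs are below) =====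
def Claim_equal_build_script : Prop := ∀ (segments : List (String × String)), Dom_build_script segments → Spec_build_script segments (build_script segments)

-- ===== LEMMAS AND PROOFS =====

/-- Characterisation of B's fused single pass: the three metadata slots end up as
    the first occurrence of their key (unless already filled), and the body slot
    collects exactly the chapter/para lines in order. -/
theorem foldl_bsStep (segs : List (String × String))
    (t s a : Option String) (acc : List String) :
    segs.foldl bsStep ((t, s, a), acc)
      = ((t.orElse (fun _ => (segs.find? (fun p => p.1 == "title")).map (·.2)),
          s.orElse (fun _ => (segs.find? (fun p => p.1 == "subtitle")).map (·.2)),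
          a.orElse (fun _ => (segs.find? (fun p => p.1 == "author")).map (·.2))),
         acc ++ segs.filterMap (fun p =>
            if p.1 == "chapter" then some ("\n\n" ++ p.2 ++ ".\n")
            else if p.1 == "para" then some p.2
            else none)) := by
  induction segs generalizing t s a acc with
  | nil => cases t <;> cases s <;> cases a <;> simp [Option.orElse]
  | cons p segs ih =>
    simp only [List.foldl_cons, List.filterMap_cons, bsStep]
    by_cases h1 : p.1 = "title" <;> by_cases h2 : p.1 = "subtitle" <;>
      by_cases h3 : p.1 = "author" <;> by_cases h4 : p.1 = "chapter" <;>
      by_cases h5 : p.1 = "para" <;>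
      simp_all [List.find?_cons_of_pos, List.find?_cons_of_neg] <;>
      first
      | (cases t <;> simp)
      | (cases s <;> simp)
      | (cases a <;> simp)

/-- The accumulator loop of A appends exactly the chapter/para lines. -/
theorem foldl_lines_eq (segs : List (String × String)) (acc : List String) :
    segs.foldl (fun ls p =>
      if p.1 == "title" || p.1 == "subtitle" || p.1 == "author" then ls
      else if p.1 == "chapter" then ls ++ ["\n\n" ++ p.2 ++ ".\n"]
      else if p.1 == "para" then ls ++ [p.2]
      else ls) acc
    = acc ++ segs.filterMap (fun p =>
        if p.1 == "chapter" then some ("\n\n" ++ p.2 ++ ".\n")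
        else if p.1 == "para" then some p.2
        else none) := by
  induction segs generalizing acc with
  | nil => simp
  | cons a segs ih =>
    simp only [List.foldl_cons, List.filterMap_cons]
    by_cases h1 : a.1 = "title" <;> by_cases h2 : a.1 = "subtitle" <;>
      by_cases h3 : a.1 = "author" <;> by_cases h4 : a.1 = "chapter" <;>
      by_cases h5 : a.1 = "para" <;>
      simp_all

-- ===== VERDICT (by name: the statement is the Claim_ definition above) =====
theorem build_script_spec : Claim_equal_build_script := by
  intro segments _
  unfold Spec_build_script build_script build_script_alt
  simp only [foldl_bsStep, foldl_lines_eq, Option.orElse]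
  split_ifs <;> rfl
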